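-- pv_equiv track=rewrite | github.com/taholme/aoc | 2023/day13/main.py | row_symmetry
-- ===== SOURCE A (Python) =====
-- def row_symmetry(grid):
--     for r in range(1, len(grid)):
--         top = grid[:r][::-1]
--         bot = grid[r:]
--
--         top = top[: len(bot)]
--         bot = bot[: len(top)]
--
--         if top == bot:
--             return r
--     return 0
-- ===== SOURCE B (Python) =====
-- def row_symmetry(grid):
--     n = len(grid)
--     r = 1
--     while r < n:
--         i, j = r - 1, r
--         while i >= 0 and j < n and grid[i] == grid[j]:
--             i -= 1
--             j += 1
--         if i < 0 or j >= n:
--             return r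
--         r += 1
--     return 0
-- ===== Notes on version B (the rewrite author's own statement) =====
-- stated objective: faster
-- what changed: Replaces A's build-reverse-truncate-and-compare of whole list slices at each candidate row with an in-place two-pointer outward walk that compares rows pairwise and stops at the first mismatch, allocating no intermediate lists.
import Mathlib
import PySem

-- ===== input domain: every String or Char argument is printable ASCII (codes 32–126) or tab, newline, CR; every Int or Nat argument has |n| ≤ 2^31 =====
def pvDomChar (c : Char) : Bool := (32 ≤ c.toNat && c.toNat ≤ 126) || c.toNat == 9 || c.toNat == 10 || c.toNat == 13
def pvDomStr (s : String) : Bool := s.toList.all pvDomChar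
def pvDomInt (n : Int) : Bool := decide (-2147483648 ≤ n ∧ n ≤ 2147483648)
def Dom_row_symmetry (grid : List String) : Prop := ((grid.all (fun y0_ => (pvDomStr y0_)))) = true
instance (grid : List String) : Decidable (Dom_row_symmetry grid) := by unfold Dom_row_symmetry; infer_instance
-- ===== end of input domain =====

-- B replaces A's reverse-slice-truncate-and-compare per candidate row with a two-pointer
-- outward pairwise walk (objective: alternative; no intermediate lists).

-- ===== PORT A =====
-- the 'for r in range(1, len(grid))' loop with early return, one step per range element
def rowsA (grid : List String) : List Int → Int
  | [] => 0
  | r :: rs =>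
    let top := (PySem.List.slice grid none (some r)).reverse      -- grid[:r][::-1]
    let bot := PySem.List.slice grid (some r) none                 -- grid[r:]
    let top2 := PySem.List.slice top none (some (bot.length : Int))   -- top[:len(bot)]
    let bot2 := PySem.List.slice bot none (some (top2.length : Int))  -- bot[:len(top)]
    if top2 = bot2 then r else rowsA grid rs

def row_symmetry (grid : List String) : Int :=
  rowsA grid (PySem.List.pyRange 1 grid.length 1)

-- ===== PORT B =====
-- inner 'while i >= 0 and j < n and grid[i] == grid[j]' walk; result true iff the
-- walk ran out of bounds (i < 0 or j >= n) rather than stopping on a mismatch.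
-- grid[i]/grid[j] are in range whenever read (guard gives 0 <= i and j < n, and i < j
-- at every call), so pyGetD is exact here. The Nat argument is fuel making the while
-- loop structurally recursive; callers pass enough for the loop to run to completion.
def walkB (grid : List String) : Nat → Int → Int → Bool
  | 0, _, _ => true
  | fuel + 1, i, j =>
    if 0 ≤ i ∧ j < (grid.length : Int) then
      if PySem.List.pyGetD grid i "" = PySem.List.pyGetD grid j "" then
        walkB grid fuel (i - 1) (j + 1)
      else false
    else true

-- outer 'while r < n' loop, again with sufficient fuel
def goB (grid : List String) : Nat → Int → Int
  | 0, _ => 0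
  | fuel + 1, r =>
    if r < (grid.length : Int) then
      if walkB grid (grid.length + 1) (r - 1) r then r else goB grid fuel (r + 1)
    else 0

def row_symmetry_alt (grid : List String) : Int := goB grid grid.length 1

-- ===== PRECONDITION & SPEC =====
def Spec_row_symmetry (grid : List String) (out : Int) : Prop := out = row_symmetry_alt grid
instance (grid : List String) (out : Int) : Decidable (Spec_row_symmetry grid out) := by unfold Spec_row_symmetry; infer_instance

-- ===== CLAIM (what is proved, stated in full; the proofs are below) =====
def Claim_equal_row_symmetry : Prop := ∀ (grid : List String), Dom_row_symmetry grid → Spec_row_symmetry grid (row_symmetry grid)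

-- ===== LEMMAS AND PROOFS =====

/-- Pointwise comparison of two lists over their common prefix. -/
def allZipEq : List String → List String → Bool
  | [], _ => true
  | _, [] => true
  | a :: xs, b :: ys => decide (a = b) && allZipEq xs ys

lemma allZipEq_nil_right : ∀ (xs : List String), allZipEq xs [] = true := by
  intro xs; cases xs <;> rfl

/-- A's truncate-both-then-compare test equals the pointwise common-prefix test. -/
lemma take_take_iff : ∀ (xs ys : List String),
    (xs.take ys.length = ys.take (xs.take ys.length).length) ↔ allZipEq xs ys = true := by
  intro xs
  induction xs with
  | nil => intro ys; simp [allZipEq]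
  | cons a xs ih =>
    intro ys
    cases ys with
    | nil => simp [allZipEq]
    | cons b ys =>
      simp only [List.length_cons, List.take_succ_cons, allZipEq, Bool.and_eq_true,
        decide_eq_true_eq, List.cons.injEq]
      constructor
      · rintro ⟨h1, h2⟩; exact ⟨h1, (ih ys).mp h2⟩
      · rintro ⟨h1, h2⟩; exact ⟨h1, (ih ys).mpr h2⟩

/-- With enough fuel, the two-pointer walk computes the pointwise common-prefix test on
    (reversed prefix before the mirror, suffix from the mirror). -/
lemma walk_eq (grid : List String) : ∀ (fuel : Nat) (i j : Int),
    ((grid.length : Int) - j).toNat ≤ fuel → i < j → 0 ≤ j →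
    walkB grid fuel i j = allZipEq ((grid.take (i + 1).toNat).reverse) (grid.drop j.toNat) := by
  intro fuel
  induction fuel with
  | zero =>
    intro i j hf hij hj
    have hd : grid.length ≤ j.toNat := by omega
    rw [walkB, List.drop_eq_nil_of_le hd, allZipEq_nil_right]
  | succ fuel ih =>
    intro i j hf hij hj
    rw [walkB]
    by_cases hg : 0 ≤ i ∧ j < (grid.length : Int)
    · obtain ⟨hi, hjl⟩ := hg
      have hiN : i.toNat < grid.length := by omega
      have hjN : j.toNat < grid.length := by omega
      rw [if_pos ⟨hi, hjl⟩]
      rw [PySem.List.pyGetD_eq_getElem grid "" hi (by omega),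
          PySem.List.pyGetD_eq_getElem grid "" (by omega) hjl]
      have htake : (grid.take (i + 1).toNat).reverse
          = grid[i.toNat] :: (grid.take i.toNat).reverse := by
        have h1 : (i + 1).toNat = i.toNat + 1 := by omega
        rw [h1, List.take_add_one, List.getElem?_eq_getElem hiN]
        simp
      have hdrop : grid.drop j.toNat = grid[j.toNat] :: grid.drop (j.toNat + 1) :=
        List.drop_eq_getElem_cons hjN
      rw [htake, hdrop]
      by_cases heq : grid[i.toNat] = grid[j.toNat]
      · rw [if_pos heq]
        have h2 : (j + 1).toNat = j.toNat + 1 := by omega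
        have h3 : (i - 1 + 1).toNat = i.toNat := by omega
        rw [ih (i - 1) (j + 1) (by omega) (by omega) (by omega), h2, h3]
        simp [allZipEq, heq]
      · rw [if_neg heq]
        simp [allZipEq, heq]
    · rw [if_neg hg]
      by_cases hi : i < 0
      · have h0 : (i + 1).toNat = 0 := by omega
        rw [h0]; simp [allZipEq]
      · have hd : grid.length ≤ j.toNat := by omega
        rw [List.drop_eq_nil_of_le hd, allZipEq_nil_right]

/-- One candidate row: A's slice test agrees with B's walk. -/
lemma cond_eq (grid : List String) (r : Int) (h1 : 1 ≤ r) (_h2 : r < (grid.length : Int)) :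
    (PySem.List.slice ((PySem.List.slice grid none (some r)).reverse) none
        (some ((PySem.List.slice grid (some r) none).length : Int))
      = PySem.List.slice (PySem.List.slice grid (some r) none) none
          (some ((PySem.List.slice ((PySem.List.slice grid none (some r)).reverse) none
            (some ((PySem.List.slice grid (some r) none).length : Int))).length : Int)))
    ↔ walkB grid (grid.length + 1) (r - 1) r = true := by
  rw [PySem.List.slice_to grid (show (0:Int) ≤ r by omega),
      PySem.List.slice_from grid (show (0:Int) ≤ r by omega)]
  rw [PySem.List.slice_to_natCast, PySem.List.slice_to_natCast]
  rw [walk_eq grid (grid.length + 1) (r - 1) r (by omega) (by omega) (by omega)]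
  have : (r - 1 + 1).toNat = r.toNat := by omega
  rw [this]
  exact take_take_iff ((grid.take r.toNat).reverse) (grid.drop r.toNat)

/-- The two outer loops agree from any start 1 ≤ r, given enough fuel. -/
lemma outer_eq (grid : List String) : ∀ (fuel : Nat) (r : Int),
    ((grid.length : Int) - r).toNat ≤ fuel → 1 ≤ r →
    rowsA grid (PySem.List.pyRange r grid.length 1) = goB grid fuel r := by
  intro fuel
  induction fuel with
  | zero =>
    intro r hf hr
    rw [goB]
    have : PySem.List.pyRange r grid.length 1 = [] := by
      rw [PySem.List.pyRange_one]
      have : ((grid.length : Int) - r).toNat = 0 := by omega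
      rw [this]; rfl
    rw [this, rowsA]
  | succ fuel ih =>
    intro r hf hr
    by_cases hlt : r < (grid.length : Int)
    · have hcons : PySem.List.pyRange r grid.length 1
          = r :: PySem.List.pyRange (r + 1) grid.length 1 := by
        rw [PySem.List.pyRange_one_cons hlt]
      rw [hcons, goB, if_pos hlt]
      show (if _ = _ then r else rowsA grid (PySem.List.pyRange (r + 1) grid.length 1)) = _
      by_cases hc : walkB grid (grid.length + 1) (r - 1) r = true
      · rw [if_pos hc, if_pos ((cond_eq grid r hr hlt).mpr hc)]
      · rw [if_neg hc]
        rw [if_neg (fun h => hc ((cond_eq grid r hr hlt).mp h))]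
        exact ih (r + 1) (by omega) (by omega)
    · rw [goB, if_neg hlt]
      have : PySem.List.pyRange r grid.length 1 = [] := by
        rw [PySem.List.pyRange_one]
        have : ((grid.length : Int) - r).toNat = 0 := by omega
        rw [this]; rfl
      rw [this, rowsA]

-- ===== VERDICT (by name: the statement is the Claim_ definition above) =====
theorem row_symmetry_spec : Claim_equal_row_symmetry := by
  intro grid _
  unfold Spec_row_symmetry row_symmetry row_symmetry_alt
  exact outer_eq grid grid.length 1 (by omega) (le_refl _)
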